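-- pv_equiv track=rewrite | github.com/hamedR96/ANTM | antm/sws.py | slice_by_year
-- ===== SOURCE A (Python) =====
-- def slice_by_year(list_zip, min_year, max_year, nb_years, overlap_years) :
--     if(nb_years < overlap_years) :
--         return []
--     sliced_list_id = []
--     sliced_list_dv = []
--     list_tmp_id = []
--     list_tmp_dv = []
--     curr_year = min_year
--     while (curr_year < max_year) :
--         period = [curr_year + i for i in range(0,nb_years)]
--         for i in range(len(list_zip)) :
--             if list_zip[i][0] in period :
--                 list_tmp_id.append(list_zip[i][1])
--                 list_tmp_dv.append(list_zip[i][2])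
--         sliced_list_id.append(list_tmp_id)
--         sliced_list_dv.append(list_tmp_dv)
--         list_tmp_id = []
--         list_tmp_dv = []
--         curr_year = curr_year + nb_years - overlap_years
--     return sliced_list_dv, sliced_list_id
-- ===== SOURCE B (Python) =====
-- def slice_by_year(list_zip, min_year, max_year, nb_years, overlap_years):
--     if nb_years < overlap_years:
--         return []
--     step = nb_years - overlap_years
--     if min_year >= max_year:
--         return [], []
--     nwin = (max_year - min_year + step - 1) // step  # number of windows (raises if step == 0)
--     ids = [[] for _ in range(nwin)]
--     dvs = [[] for _ in range(nwin)]
--     for y, i, d in list_zip: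
--         lo = max(0, -((min_year + nb_years - 1 - y) // step))
--         hi = min(nwin - 1, (y - min_year) // step)
--         for k in range(lo, hi + 1):
--             ids[k].append(i)
--             dvs[k].append(d)
--     return dvs, ids
-- ===== Notes on version B (the rewrite author's own statement) =====
-- stated objective: faster
-- what changed: Instead of scanning every record per window and testing membership in a materialized list of the window's years (O(W*N*nb_years)), B computes the window count arithmetically, buckets each record once by computing its covering window index interval with two floor divisions, and appends it to exactly those buckets (O(N*windows_per_record + W)).
-- outside the precondition, e.g. on slice_by_year([(2000, 1, 2)], 1999, 2003, 1, 2): A returns (), B returns (); on slice_by_year([], 0, 2, 1, 1): A does not finish within the time limit, B raises ZeroDivisionError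
import Mathlib
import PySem

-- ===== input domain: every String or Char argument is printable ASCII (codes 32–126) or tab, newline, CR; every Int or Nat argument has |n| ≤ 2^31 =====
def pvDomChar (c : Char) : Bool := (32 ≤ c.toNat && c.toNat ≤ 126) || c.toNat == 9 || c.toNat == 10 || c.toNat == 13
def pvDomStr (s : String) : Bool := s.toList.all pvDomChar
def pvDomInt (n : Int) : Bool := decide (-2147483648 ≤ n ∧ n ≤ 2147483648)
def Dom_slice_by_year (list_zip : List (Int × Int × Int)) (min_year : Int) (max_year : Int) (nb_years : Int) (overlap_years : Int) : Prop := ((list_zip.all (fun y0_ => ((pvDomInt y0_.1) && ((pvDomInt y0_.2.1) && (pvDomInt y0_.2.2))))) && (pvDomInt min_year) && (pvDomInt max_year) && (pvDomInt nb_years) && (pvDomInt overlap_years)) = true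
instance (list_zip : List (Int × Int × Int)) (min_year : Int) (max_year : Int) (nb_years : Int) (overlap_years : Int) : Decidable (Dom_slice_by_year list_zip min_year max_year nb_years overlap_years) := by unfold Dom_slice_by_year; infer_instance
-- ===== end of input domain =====

-- B replaces A's per-window scan with membership in a materialized year list by arithmetic
-- bucketing: window count and each record's covering window-index interval are computed with
-- floor divisions, and the record is appended once to exactly those buckets (objective: faster;
-- Pre_ excludes the inputs where A returns the bare list [] instead of a pair, and where A loops forever).


-- ===== PORT A =====
-- A's while loop; fuel (max_year - min_year).toNat suffices under Pre_ (curr grows by ≥ 1 per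
-- iteration); the fuel-0 fallback is unreachable inside Pre_.
def slice_by_year_go (list_zip : List (Int × Int × Int)) (max_year nb_years overlap_years : Int) :
    Nat → Int → List (List Int) → List (List Int) → List (List Int) × List (List Int)
  | fuel, curr_year, sliced_id, sliced_dv =>
    if curr_year < max_year then
      match fuel with
      | 0 => (sliced_dv, sliced_id)
      | fuel + 1 =>
        let period := (PySem.List.pyRange 0 nb_years 1).map (fun i => curr_year + i)
        let tmp := list_zip.foldl
          (fun (p : List Int × List Int) t =>
            if t.1 ∈ period then (p.1 ++ [t.2.1], p.2 ++ [t.2.2]) else p) ([], [])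
        slice_by_year_go list_zip max_year nb_years overlap_years fuel
          (curr_year + nb_years - overlap_years)
          (sliced_id ++ [tmp.1]) (sliced_dv ++ [tmp.2])
    else (sliced_dv, sliced_id)

def slice_by_year (list_zip : List (Int × Int × Int)) (min_year : Int) (max_year : Int) (nb_years : Int) (overlap_years : Int) : List (List Int) × List (List Int) :=
  if nb_years < overlap_years then ([], [])  -- Python returns the bare list [] here (excluded by Pre_)
  else slice_by_year_go list_zip max_year nb_years overlap_years
        (max_year - min_year).toNat min_year [] []

-- ===== PORT B =====
def slice_by_year_alt (list_zip : List (Int × Int × Int)) (min_year : Int) (max_year : Int) (nb_years : Int) (overlap_years : Int) : List (List Int) × List (List Int) :=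
  if nb_years < overlap_years then ([], [])  -- Python returns the bare list [] here (excluded by Pre_)
  else
    let step := nb_years - overlap_years
    if max_year ≤ min_year then ([], [])
    else
      -- Python raises ZeroDivisionError if step = 0 here (excluded by Pre_)
      let nwin := PySem.Int.floordiv (max_year - min_year + step - 1) step
      let init : List (List Int) × List (List Int) :=
        (List.replicate nwin.toNat [], List.replicate nwin.toNat [])
      let res := list_zip.foldl
        (fun (p : List (List Int) × List (List Int)) t =>
          let lo := max 0 (-(PySem.Int.floordiv (min_year + nb_years - 1 - t.1) step))
          let hi := min (nwin - 1) (PySem.Int.floordiv (t.1 - min_year) step)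
          (PySem.List.pyRange lo (hi + 1) 1).foldl
            (fun (q : List (List Int) × List (List Int)) k =>
              (q.1.modify k.toNat (· ++ [t.2.1]), q.2.modify k.toNat (· ++ [t.2.2]))) p)
        init
      (res.2, res.1)

-- ===== PRECONDITION & SPEC =====
-- Pre_ excludes (i) nb_years < overlap_years, where A returns the bare list [] instead of a pair
-- of lists (a value outside the declared return type), and (ii) nb_years = overlap_years with
-- min_year < max_year, where A's while loop never advances and A diverges (B raises there).
def Pre_slice_by_year (list_zip : List (Int × Int × Int)) (min_year : Int) (max_year : Int) (nb_years : Int) (overlap_years : Int) : Prop :=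
  overlap_years < nb_years ∨ (max_year ≤ min_year ∧ overlap_years ≤ nb_years)
instance (list_zip : List (Int × Int × Int)) (min_year : Int) (max_year : Int) (nb_years : Int) (overlap_years : Int) : Decidable (Pre_slice_by_year list_zip min_year max_year nb_years overlap_years) := by unfold Pre_slice_by_year; infer_instance

def pvWitness_slice_by_year : (List (Int × Int × Int)) × Int × Int × Int × Int :=
  ([(2000, 1, 10), (2001, 2, 20), (2003, 3, 30)], 2000, 2004, 2, 1)

def Spec_slice_by_year (list_zip : List (Int × Int × Int)) (min_year : Int) (max_year : Int) (nb_years : Int) (overlap_years : Int) (out : List (List Int) × List (List Int)) : Prop := out = slice_by_year_alt list_zip min_year max_year nb_years overlap_years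
instance (list_zip : List (Int × Int × Int)) (min_year : Int) (max_year : Int) (nb_years : Int) (overlap_years : Int) (out : List (List Int) × List (List Int)) : Decidable (Spec_slice_by_year list_zip min_year max_year nb_years overlap_years out) := by unfold Spec_slice_by_year; infer_instance

-- ===== CLAIM (what is proved, stated in full; the proofs are below) =====
def Claim_equal_slice_by_year : Prop := ∀ (list_zip : List (Int × Int × Int)) (min_year : Int) (max_year : Int) (nb_years : Int) (overlap_years : Int), Dom_slice_by_year list_zip min_year max_year nb_years overlap_years → Pre_slice_by_year list_zip min_year max_year nb_years overlap_years → Spec_slice_by_year list_zip min_year max_year nb_years overlap_years (slice_by_year list_zip min_year max_year nb_years overlap_years)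

-- ===== LEMMAS AND PROOFS =====

-- the list of window start years A's while loop visits
def pvWins (mx step c : Int) : List Int :=
  if _h : 0 < step ∧ c < mx then c :: pvWins mx step (c + step) else []
termination_by (mx - c).toNat
decreasing_by omega

-- the window-index interval B computes for a record, as the pyRange B iterates
def pvIdx (mn nb step W : Int) (t : Int × Int × Int) : List Int :=
  PySem.List.pyRange (max 0 (-(PySem.Int.floordiv (mn + nb - 1 - t.1) step)))
    (min (W - 1) (PySem.Int.floordiv (t.1 - mn) step) + 1) 1

-- a foldl over a pair whose update acts componentwise splits into two foldls
theorem pvFoldlPair {α β γ : Type} (l : List γ) (u : α × β → γ → α × β)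
    (u1 : α → γ → α) (u2 : β → γ → β)
    (h : ∀ p t, u p t = (u1 p.1 t, u2 p.2 t)) :
    ∀ (p : α × β), l.foldl u p = (l.foldl u1 p.1, l.foldl u2 p.2) := by
  induction l with
  | nil => intro p; rfl
  | cons t l ih => intro p; simp only [List.foldl_cons, h p t]; exact ih _

-- B's record-level fold splits into an id-bucket fold and a dv-bucket fold
theorem pvAltSplit (lz : List (Int × Int × Int)) (mn nb step W : Int)
    (init1 init2 : List (List Int)) :
    lz.foldl (fun (p : List (List Int) × List (List Int)) t =>
        (PySem.List.pyRange (max 0 (-(PySem.Int.floordiv (mn + nb - 1 - t.1) step)))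
            (min (W - 1) (PySem.Int.floordiv (t.1 - mn) step) + 1) 1).foldl
          (fun q k => (q.1.modify k.toNat (· ++ [t.2.1]), q.2.modify k.toNat (· ++ [t.2.2]))) p)
        (init1, init2)
      = (lz.foldl (fun B t => (pvIdx mn nb step W t).foldl
            (fun B k => B.modify k.toNat (· ++ [t.2.1])) B) init1,
         lz.foldl (fun B t => (pvIdx mn nb step W t).foldl
            (fun B k => B.modify k.toNat (· ++ [t.2.2])) B) init2) := by
  refine pvFoldlPair _ _ _ _ (fun p t => ?_) (init1, init2)
  simp only [pvIdx]
  exact pvFoldlPair _ _ (fun (B : List (List Int)) (k : Int) => B.modify k.toNat (· ++ [t.2.1]))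
    (fun (B : List (List Int)) (k : Int) => B.modify k.toNat (· ++ [t.2.2])) (fun _ _ => rfl) p

-- A's inner for-loop is a filter-and-map on each component
theorem pvAInner (lz : List (Int × Int × Int)) (period : List Int) :
    ∀ (a b : List Int),
      lz.foldl (fun (p : List Int × List Int) t =>
          if t.1 ∈ period then (p.1 ++ [t.2.1], p.2 ++ [t.2.2]) else p) (a, b)
        = (a ++ (lz.filter (fun t => decide (t.1 ∈ period))).map (·.2.1),
           b ++ (lz.filter (fun t => decide (t.1 ∈ period))).map (·.2.2)) := by
  induction lz with
  | nil => intro a b; simp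
  | cons t lz ih =>
    intro a b
    by_cases h : t.1 ∈ period
    · simp only [List.foldl_cons, if_pos h, ih, List.filter_cons, decide_eq_true h]
      simp
    · simp only [List.foldl_cons, if_neg h, ih, List.filter_cons]
      simp [h]

-- A's while loop appends one filtered window per start in pvWins
theorem pvGoEq (lz : List (Int × Int × Int)) (mx nb ov : Int) (hs : 0 < nb - ov) :
    ∀ (fuel : Nat) (c : Int) (aI aD : List (List Int)), (mx - c).toNat ≤ fuel →
      slice_by_year_go lz mx nb ov fuel c aI aD
        = (aD ++ (pvWins mx (nb - ov) c).map (fun s =>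
              (lz.filter (fun t => decide (t.1 ∈ (PySem.List.pyRange 0 nb 1).map (fun i => s + i)))).map (·.2.2)),
           aI ++ (pvWins mx (nb - ov) c).map (fun s =>
              (lz.filter (fun t => decide (t.1 ∈ (PySem.List.pyRange 0 nb 1).map (fun i => s + i)))).map (·.2.1))) := by
  intro fuel
  induction fuel with
  | zero =>
    intro c aI aD hf
    have hcm : ¬ c < mx := by omega
    rw [pvWins, dif_neg (by omega)]
    simp [slice_by_year_go, hcm]
  | succ fuel ih =>
    intro c aI aD hf
    by_cases hcm : c < mx
    · rw [pvWins, dif_pos ⟨hs, hcm⟩]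
      simp only [slice_by_year_go, if_pos hcm]
      rw [pvAInner]
      have harith : c + nb - ov = c + (nb - ov) := by ring
      rw [harith, ih (c + (nb - ov)) _ _ (by omega)]
      simp
    · rw [pvWins, dif_neg (by tauto)]
      simp [slice_by_year_go, hcm]

-- one record's range-fold of modifies, observed at index j
theorem pvModFold {α : Type} (f : List α → List α) :
    ∀ (ks : List Int), (∀ k ∈ ks, 0 ≤ k) → ks.Nodup →
      ∀ (L : List (List α)) (j : Nat),
        (ks.foldl (fun B k => B.modify k.toNat (f ·)) L)[j]?
          = if (j : Int) ∈ ks then (L[j]?).map f else L[j]? := by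
  intro ks
  induction ks with
  | nil => intro _ _ L j; simp
  | cons k ks ih =>
    intro hpos hnd L j
    have hk : 0 ≤ k := hpos k (by simp)
    simp only [List.foldl_cons]
    rw [ih (fun k hk => hpos k (by simp [hk])) hnd.of_cons]
    by_cases hjk : (j : Int) = k
    · have hjk' : k.toNat = j := by omega
      have hjks : (j : Int) ∉ ks := by rw [hjk]; exact (List.nodup_cons.mp hnd).1
      rw [if_neg hjks, if_pos (by simp [hjk]), List.getElem?_modify, hjk']
      cases L[j]? <;> simp
    · have hjk' : k.toNat ≠ j := by omega
      rw [List.getElem?_modify]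
      have hid : (fun a => if k.toNat = j then f a else a) = (fun a => a) := by
        funext a; rw [if_neg hjk']
      rw [hid]
      simp only [List.mem_cons, hjk, false_or]
      cases L[j]? <;> simp

-- the whole bucket fold, observed at index j
theorem pvBucket {T α : Type} (sel : T → α) (idx : T → List Int)
    (hpos : ∀ t, ∀ k ∈ idx t, 0 ≤ k) (hnd : ∀ t, (idx t).Nodup) :
    ∀ (lz : List T) (acc : List (List α)) (j : Nat),
      (lz.foldl (fun B t => (idx t).foldl (fun B k => B.modify k.toNat (· ++ [sel t])) B) acc)[j]?
        = (acc[j]?).map (· ++ (lz.filter (fun t => decide ((j : Int) ∈ idx t))).map sel) := by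
  intro lz
  induction lz with
  | nil => intro acc j; cases h : acc[j]? <;> simp [h]
  | cons t lz ih =>
    intro acc j
    simp only [List.foldl_cons]
    rw [ih, pvModFold (· ++ [sel t]) (idx t) (hpos t) (hnd t), List.filter_cons]
    by_cases hm : (j : Int) ∈ idx t
    · rw [if_pos hm]
      simp only [decide_eq_true hm]
      cases h : acc[j]? <;> simp [h]
    · rw [if_neg hm]
      simp only [hm, decide_false]
      cases h : acc[j]? <;> simp [h]

-- closed form for the elements of pvWins (fuelled strong induction)
theorem pvWins_getElem?_aux (mx step : Int) (hs : 0 < step) :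
    ∀ (n : Nat) (c : Int) (j : Nat), (mx - c).toNat ≤ n →
      (pvWins mx step c)[j]? = if c + (j : Int) * step < mx then some (c + j * step) else none := by
  intro n
  induction n with
  | zero =>
    intro c j hn
    rw [pvWins, dif_neg (by omega)]
    have hnn : 0 ≤ (j : Int) * step := mul_nonneg (by positivity) (le_of_lt hs)
    have hcond : ¬ (c + (j : Int) * step < mx) := by omega
    simp only [List.getElem?_nil]
    rw [if_neg hcond]
  | succ n ih =>
    intro c j hn
    by_cases hcm : c < mx
    · rw [pvWins, dif_pos ⟨hs, hcm⟩]
      cases j with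
      | zero => simp [hcm]
      | succ j =>
        have h1 : (c + step) + (j : Int) * step = c + ((j : Nat) + 1 : Nat) * step := by
          push_cast; ring
        rw [List.getElem?_cons_succ, ih (c + step) j (by omega), h1]
    · rw [pvWins, dif_neg (by tauto)]
      have hnn : 0 ≤ (j : Int) * step := mul_nonneg (by positivity) (le_of_lt hs)
      have hcond : ¬ (c + (j : Int) * step < mx) := by omega
      simp only [List.getElem?_nil]
      rw [if_neg hcond]

theorem pvWins_getElem? (mx step c : Int) (hs : 0 < step) (j : Nat) :
    (pvWins mx step c)[j]? = if c + (j : Int) * step < mx then some (c + j * step) else none :=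
  pvWins_getElem?_aux mx step hs (mx - c).toNat c j le_rfl

-- membership in A's materialized period list is an interval condition
theorem pvMemPeriod (s y nb : Int) :
    y ∈ (PySem.List.pyRange 0 nb 1).map (fun i => s + i) ↔ s ≤ y ∧ y < s + nb := by
  simp only [List.mem_map, PySem.List.mem_pyRange_one]
  constructor
  · rintro ⟨i, hi, rfl⟩; omega
  · intro h; exact ⟨y - s, by omega, by omega⟩

-- ===== VERDICT (by name: the statement is the Claim_ definition above) =====
theorem slice_by_year_spec : Claim_equal_slice_by_year := by
  intro lz mn mx nb ov _ hPre
  unfold Spec_slice_by_year slice_by_year slice_by_year_alt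
  have hno : ¬ nb < ov := by rcases hPre with h | ⟨-, h⟩ <;> omega
  rw [if_neg hno, if_neg hno]
  by_cases hmx : mx ≤ mn
  · rw [if_pos hmx]
    have h0 : (mx - mn).toNat = 0 := by omega
    rw [h0]
    simp [slice_by_year_go, show ¬ mn < mx by omega]
  · rw [if_neg hmx]
    have hs : 0 < nb - ov := by rcases hPre with h | ⟨h, -⟩ <;> omega
    rw [pvGoEq lz mx nb ov hs _ mn [] [] (le_refl _)]
    simp only [List.nil_append]
    rw [pvAltSplit]
    have hpos : ∀ t : Int × Int × Int,
        ∀ k ∈ pvIdx mn nb (nb - ov) (PySem.Int.floordiv (mx - mn + (nb - ov) - 1) (nb - ov)) t, 0 ≤ k := by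
      intro t k hk
      rw [pvIdx, PySem.List.mem_pyRange_one] at hk
      omega
    have hnd : ∀ t : Int × Int × Int,
        (pvIdx mn nb (nb - ov) (PySem.Int.floordiv (mx - mn + (nb - ov) - 1) (nb - ov)) t).Nodup :=
      fun _ => PySem.List.nodup_pyRange_one _ _
    have key : ∀ (sel : (Int × Int × Int) → Int) (j : Nat),
        ((pvWins mx (nb - ov) mn).map (fun s =>
          (lz.filter (fun t => decide (t.1 ∈ (PySem.List.pyRange 0 nb 1).map (fun i => s + i)))).map sel))[j]?
        = (lz.foldl (fun B t =>
              (pvIdx mn nb (nb - ov) (PySem.Int.floordiv (mx - mn + (nb - ov) - 1) (nb - ov)) t).foldl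
                (fun B k => B.modify k.toNat (· ++ [sel t])) B)
            (List.replicate (PySem.Int.floordiv (mx - mn + (nb - ov) - 1) (nb - ov)).toNat []))[j]? := by
      intro sel j
      rw [List.getElem?_map, pvWins_getElem? mx (nb - ov) mn hs j,
          pvBucket sel _ hpos hnd, List.getElem?_replicate]
      have hjW : mn + (j : Int) * (nb - ov) < mx ↔
          j < (PySem.Int.floordiv (mx - mn + (nb - ov) - 1) (nb - ov)).toNat := by
        have h1 : (j : Int) + 1 ≤ PySem.Int.floordiv (mx - mn + (nb - ov) - 1) (nb - ov) ↔
            ((j : Int) + 1) * (nb - ov) ≤ mx - mn + (nb - ov) - 1 :=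
          PySem.Int.le_floordiv_iff_mul_le hs
        have h2 : ((j : Int) + 1) * (nb - ov) = (j : Int) * (nb - ov) + (nb - ov) := by ring
        rw [h2] at h1
        omega
      by_cases hj : j < (PySem.Int.floordiv (mx - mn + (nb - ov) - 1) (nb - ov)).toNat
      · rw [if_pos (by omega), if_pos hj]
        simp only [Option.map_some, Option.some.injEq, List.nil_append]
        refine congrArg (List.map sel) (List.filter_congr ?_)
        intro t _
        simp only [decide_eq_decide]
        rw [pvMemPeriod, pvIdx, PySem.List.mem_pyRange_one]
        have hA : (j : Int) ≤ PySem.Int.floordiv (t.1 - mn) (nb - ov) ↔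
            (j : Int) * (nb - ov) ≤ t.1 - mn := PySem.Int.le_floordiv_iff_mul_le hs
        have hB : -(j : Int) ≤ PySem.Int.floordiv (mn + nb - 1 - t.1) (nb - ov) ↔
            -(j : Int) * (nb - ov) ≤ mn + nb - 1 - t.1 := PySem.Int.le_floordiv_iff_mul_le hs
        rw [neg_mul] at hB
        omega
      · rw [if_neg (by omega), if_neg hj]
        simp
    refine Prod.ext ?_ ?_
    · exact List.ext_getElem? (fun j => key (·.2.2) j)
    · exact List.ext_getElem? (fun j => key (·.2.1) j)
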